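-- pv_equiv track=rewrite | github.com/swdunlop/AndBug | lib/andbug/cmd/navi.py | truncate_ojni
-- ===== SOURCE A (Python) =====
-- def truncate_ojni(jni):
--     if jni.startswith('['):
--         return truncate_ojni(jni[1:]) + '[]'
--
--     if jni.startswith('L'):
--         jni = jni[1:]
--         if jni.endswith(';'): jni = jni[:-1]
--
--     jni = jni.split('/')
--     if len(jni) == 1:
--         return jni[0]
--     else:
--         return '%s.%s' % (
--             '.'.join((a[0] if a else '') for a in jni[:-1]),
--             jni[-1]
--         )
-- ===== SOURCE B (Python) =====
-- def truncate_ojni(jni):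
--     # count leading '[' once, process the stripped core in one pass, append '[]'*n
--     n = len(jni) - len(jni.lstrip('['))
--     core = jni[n:]
--     if core.startswith('L'):
--         core = core[1:-1] if core.endswith(';') else core[1:]
--     parts = core.split('/')
--     return '.'.join([p[:1] for p in parts[:-1]] + parts[-1:]) + '[]' * n
-- ===== Notes on version B (the rewrite author's own statement) =====
-- stated objective: alternative
-- what changed: Replaces A's recursion over leading array-bracket characters (which re-appends the bracket-pair suffix at each level) with a single bracket-count pass, and builds the dotted name with one join of segment initials plus the last segment instead of A's two-piece %-format.
import Mathlib
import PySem

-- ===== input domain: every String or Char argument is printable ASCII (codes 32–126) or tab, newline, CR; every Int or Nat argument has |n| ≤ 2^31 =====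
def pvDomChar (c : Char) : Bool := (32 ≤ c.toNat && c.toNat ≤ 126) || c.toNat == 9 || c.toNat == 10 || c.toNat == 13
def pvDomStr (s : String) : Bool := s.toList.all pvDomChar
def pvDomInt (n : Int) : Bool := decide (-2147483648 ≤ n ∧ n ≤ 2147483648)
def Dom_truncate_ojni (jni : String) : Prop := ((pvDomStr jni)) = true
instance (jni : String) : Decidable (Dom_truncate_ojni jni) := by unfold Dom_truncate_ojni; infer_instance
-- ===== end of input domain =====

-- B replaces A's recursion over leading '[' by a single bracket-count pass and builds the name
-- with one join (initials of all but the last segment, plus the last segment); objective: alternative.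

-- ===== PORT A =====
-- recursive transliteration of A over the code-point list (jni[1:] = tail, jni[:-1] = dropLast)
def truncAChars (s : List Char) : List Char :=
  if PySem.Chars.startswith s ['['] then
    truncAChars s.tail ++ ['[', ']']
  else
    let s1 := if PySem.Chars.startswith s ['L'] then
        (let t := s.tail
         if PySem.Chars.endswith t [';'] then t.dropLast else t)
      else s
    let parts := PySem.Chars.splitOn s1 ['/']
    if parts.length == 1 then (PySem.List.pyGet? parts 0).getD []
    else
      PySem.Chars.join ['.']
          ((PySem.List.slice parts none (some (-1))).map
            (fun a => if a.isEmpty then [] else [a.headI]))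
        ++ ['.'] ++ (PySem.List.pyGet? parts (-1)).getD []
termination_by s.length
decreasing_by
  rename_i h
  have hne : s ≠ [] := by
    intro hnil
    rw [hnil] at h
    simp [PySem.Chars.startswith] at h
  cases s with
  | nil => exact absurd rfl hne
  | cons c r => simp

def truncate_ojni (jni : String) : String :=
  String.ofList (truncAChars jni.toList)

-- ===== PORT B =====
def truncate_ojni_alt (jni : String) : String :=
  let s := jni.toList
  let core := s.dropWhile (fun c => c == '[')       -- jni.lstrip('[')
  let n := s.length - core.length
  let core1 := if PySem.Chars.startswith core ['L'] then
      (if PySem.Chars.endswith core [';'] then PySem.List.slice core (some 1) (some (-1))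
       else PySem.List.slice core (some 1) none)
    else core
  let parts := PySem.Chars.splitOn core1 ['/']
  String.ofList (PySem.Chars.join ['.']
      ((PySem.List.slice parts none (some (-1))).map (fun p => PySem.List.slice p none (some 1))
        ++ PySem.List.slice parts (some (-1)) none)
    ++ (List.replicate n ['[', ']']).flatten)        -- '[]' * n

-- ===== PRECONDITION & SPEC =====
def Spec_truncate_ojni (jni : String) (out : String) : Prop := out = truncate_ojni_alt jni
instance (jni : String) (out : String) : Decidable (Spec_truncate_ojni jni out) := by unfold Spec_truncate_ojni; infer_instance

-- ===== CLAIM (what is proved, stated in full; the proofs are below) =====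
def Claim_equal_truncate_ojni : Prop := ∀ (jni : String), Dom_truncate_ojni jni → Spec_truncate_ojni jni (truncate_ojni jni)

-- ===== LEMMAS AND PROOFS =====

-- B's processing of the bracket-stripped core (proof helper; definitionally B's body after the dropWhile)
def pvCore (t : List Char) : List Char :=
  let core1 := if PySem.Chars.startswith t ['L'] then
      (if PySem.Chars.endswith t [';'] then PySem.List.slice t (some 1) (some (-1))
       else PySem.List.slice t (some 1) none)
    else t
  let parts := PySem.Chars.splitOn core1 ['/']
  PySem.Chars.join ['.']
      ((PySem.List.slice parts none (some (-1))).map (fun p => PySem.List.slice p none (some 1))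
        ++ PySem.List.slice parts (some (-1)) none)

theorem go_ne_nil (sep : List Char) (fuel : Nat) (l cur : List Char) (acc : List (List Char)) :
    PySem.Chars.splitOn.go sep fuel l cur acc ≠ [] := by
  induction fuel generalizing l cur acc with
  | zero => simp [PySem.Chars.splitOn.go]
  | succ f ih =>
    cases l with
    | nil => simp [PySem.Chars.splitOn.go]
    | cons c rest =>
      rw [PySem.Chars.splitOn.go]
      split
      · exact ih _ _ _
      · exact ih _ _ _

theorem splitOn_ne_nil (s sep : List Char) : PySem.Chars.splitOn s sep ≠ [] :=
  go_ne_nil sep _ s [] []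

theorem suffix_singleton_iff (c : Char) (l : List Char) : ([c] <:+ l) ↔ l.getLast? = some c := by
  constructor
  · rintro ⟨pre, rfl⟩; simp
  · intro h
    obtain ⟨l', rfl⟩ := List.getLast?_eq_some_iff.mp h
    exact ⟨l', rfl⟩

theorem endswith_singleton (c : Char) (l : List Char) :
    PySem.Chars.endswith l [c] = true ↔ l.getLast? = some c := by
  rw [PySem.Chars.endswith_iff]; exact suffix_singleton_iff c l

theorem join_append_singleton (d : List Char) (xs : List (List Char)) (y : List Char) (h : xs ≠ []) :
    PySem.Chars.join d (xs ++ [y]) = PySem.Chars.join d xs ++ d ++ y := by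
  induction xs with
  | nil => simp at h
  | cons a xs ih =>
    cases xs with
    | nil => simp [PySem.Chars.join_cons_cons, PySem.Chars.join_singleton]
    | cons b xs =>
      have := ih (by simp)
      simp only [List.cons_append, PySem.Chars.join_cons_cons] at this ⊢
      rw [this]
      simp [List.append_assoc]

theorem pyGet_neg_one_getD (l : List (List Char)) (h : l ≠ []) :
    (PySem.List.pyGet? l (-1)).getD [] = l.getLast h := by
  have : PySem.List.pyGet? l (-1) = l.getLast? := by
    unfold PySem.List.pyGet? PySem.List.pyIdx?
    cases l with
    | nil => simp at h
    | cons a t =>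
      simp only [List.length_cons]
      norm_num
      rw [List.getLast?_eq_getElem?]
      simp
  rw [this, List.getLast?_eq_some_getLast h, Option.getD_some]

theorem take1_eq :
    (fun (a : List Char) => if a.isEmpty then [] else [a.headI])
      = fun (p : List Char) => PySem.List.slice p none (some 1) := by
  funext p
  cases p with
  | nil => simp [PySem.List.slice_to]
  | cons c r => simp [PySem.List.slice_to]

theorem parts_end (parts : List (List Char)) (h : parts ≠ []) :
    (if parts.length == 1 then (PySem.List.pyGet? parts 0).getD []
     else
       PySem.Chars.join ['.']
           ((PySem.List.slice parts none (some (-1))).map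
             (fun a => if a.isEmpty then [] else [a.headI]))
         ++ ['.'] ++ (PySem.List.pyGet? parts (-1)).getD [])
    = PySem.Chars.join ['.']
        ((PySem.List.slice parts none (some (-1))).map (fun p => PySem.List.slice p none (some 1))
          ++ PySem.List.slice parts (some (-1)) none) := by
  rw [take1_eq, pyGet_neg_one_getD parts h, PySem.List.slice_to_neg_one,
      PySem.List.slice_from_neg_one, List.drop_length_sub_one h]
  cases parts with
  | nil => simp at h
  | cons p rest =>
    cases rest with
    | nil =>
      simp [PySem.List.pyGet?, PySem.List.pyIdx?, PySem.Chars.join_singleton, List.getLast]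
    | cons q rest =>
      have hlen : ((p :: q :: rest).length == 1) = false := by
        simp [List.length_cons]
      rw [hlen, if_neg (by simp)]
      rw [join_append_singleton ['.'] _ _ (by simp [List.dropLast_cons_of_ne_nil])]

theorem endswith_L (t : List Char) :
    PySem.Chars.endswith t [';'] = PySem.Chars.endswith ('L' :: t) [';'] := by
  cases t with
  | nil => decide
  | cons c r =>
    rcases h1 : PySem.Chars.endswith (c :: r) [';'] with _ | _
    · rcases h2 : PySem.Chars.endswith ('L' :: c :: r) [';'] with _ | _
      · rfl
      · rw [endswith_singleton, List.getLast?_cons_cons, ← endswith_singleton] at h2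
        rw [h1] at h2; cases h2
    · symm; rw [endswith_singleton] at h1 ⊢
      rw [List.getLast?_cons_cons]; exact h1

theorem Lstrip_eq (t : List Char) :
    (if PySem.Chars.endswith t [';'] then t.dropLast else t)
    = (if PySem.Chars.endswith ('L' :: t) [';'] then PySem.List.slice ('L' :: t) (some 1) (some (-1))
       else PySem.List.slice ('L' :: t) (some 1) none) := by
  rw [← endswith_L]
  split
  · simp [PySem.List.slice, List.dropLast_eq_take]
  · simp [PySem.List.slice_from]

theorem startswith_cons_true (c : Char) (r : List Char) :
    PySem.Chars.startswith (c :: r) [c] = true := by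
  rw [PySem.Chars.startswith_iff]; exact ⟨r, rfl⟩

theorem startswith_cons_false (a c : Char) (r : List Char) (h : c ≠ a) :
    PySem.Chars.startswith (c :: r) [a] = false := by
  rw [Bool.eq_false_iff]
  intro hsw
  rw [PySem.Chars.startswith_iff, List.cons_prefix_cons] at hsw
  exact h hsw.1.symm

theorem truncA_noBracket (s : List Char) (h : PySem.Chars.startswith s ['['] = false) :
    truncAChars s = pvCore s := by
  rw [truncAChars, h]
  simp only [Bool.false_eq_true, if_false]
  unfold pvCore
  rcases hL : PySem.Chars.startswith s ['L'] with _ | _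
  · simp only [Bool.false_eq_true, if_false]
    exact parts_end _ (splitOn_ne_nil _ _)
  · obtain ⟨t, rfl⟩ : ∃ t, s = 'L' :: t := by
      rw [PySem.Chars.startswith_iff] at hL
      obtain ⟨t, ht⟩ := hL
      exact ⟨t, ht.symm⟩
    simp only [if_true, List.tail_cons]
    rw [Lstrip_eq]
    exact parts_end _ (splitOn_ne_nil _ _)

theorem truncA_eq (s : List Char) :
    truncAChars s
      = pvCore (s.dropWhile (fun c => c == '['))
        ++ (List.replicate (s.length - (s.dropWhile (fun c => c == '[')).length) ['[', ']']).flatten := by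
  induction s with
  | nil =>
    rw [truncA_noBracket [] (by decide)]
    simp
  | cons c r ih =>
    by_cases hc : c = '['
    · subst hc
      rw [truncAChars, startswith_cons_true]
      simp only [if_true, List.tail_cons]
      rw [ih]
      have hdw : ('[' :: r).dropWhile (fun c => c == '[') = r.dropWhile (fun c => c == '[') := by
        simp
      have hle : (r.dropWhile (fun c => c == '[')).length ≤ r.length :=
        List.length_dropWhile_le _ _
      have hn : ('[' :: r).length - (r.dropWhile (fun c => c == '[')).length
          = (r.length - (r.dropWhile (fun c => c == '[')).length) + 1 := by
        rw [List.length_cons]; omega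
      rw [hdw, hn, List.replicate_succ', List.flatten_append]
      simp [List.append_assoc]
    · have hdw : (c :: r).dropWhile (fun c => c == '[') = c :: r := by
        simp [hc]
      rw [truncA_noBracket (c :: r) (startswith_cons_false _ _ _ hc), hdw]
      simp

-- ===== VERDICT (by name: the statement is the Claim_ definition above) =====
theorem truncate_ojni_spec : Claim_equal_truncate_ojni := by
  intro jni _
  unfold Spec_truncate_ojni truncate_ojni truncate_ojni_alt
  rw [truncA_eq]
  rfl
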